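-- pv_equiv track=rewrite | github.com/Kamal2131/JSON-driven-AGENT | AGENT/utils/json_path_extractor.py | _parse_path
-- ===== SOURCE A (Python) =====
-- from typing import Any, List, Dict
--
-- def _parse_path(path: str) -> List[Dict[str, Any]]:
--     """Parse path string into structured parts"""
--     parts = []
--     segments = path.split(".")
--
--     for segment in segments:
--         if "[]" in segment:
--             key = segment.replace("[]", "")
--             parts.append({"type": "array", "key": key, "field": None})
--         else:
--             if parts and parts[-1]["type"] == "array" and parts[-1]["field"] is None:
--                 parts[-1]["field"] = segment
--             else:
--                 parts.append({"type": "object", "key": segment})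
--
--     return parts
-- ===== SOURCE B (Python) =====
-- from typing import Any, List, Dict
--
-- def _parse_path(path: str) -> List[Dict[str, Any]]:
--     """Parse path string into structured parts (lookahead instead of retroactive mutation)."""
--     segments = path.split(".")
--     parts = []
--     i = 0
--     n = len(segments)
--     while i < n:
--         seg = segments[i]
--         if "[]" in seg:
--             key = seg.replace("[]", "")
--             if i + 1 < n and "[]" not in segments[i + 1]:
--                 parts.append({"type": "array", "key": key, "field": segments[i + 1]})
--                 i += 2
--             else:
--                 parts.append({"type": "array", "key": key, "field": None})
--                 i += 1
--         else:
--             parts.append({"type": "object", "key": seg})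
--             i += 1
--     return parts
-- ===== Notes on version B (the rewrite author's own statement) =====
-- stated objective: alternative
-- what changed: Replaces A's retroactive mutation of the last appended dict (fill an open array's 'field' when the following plain segment arrives) with a forward index walk that peeks at the next segment and emits each part dict fully formed, advancing by 1 or 2.
import Mathlib
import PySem

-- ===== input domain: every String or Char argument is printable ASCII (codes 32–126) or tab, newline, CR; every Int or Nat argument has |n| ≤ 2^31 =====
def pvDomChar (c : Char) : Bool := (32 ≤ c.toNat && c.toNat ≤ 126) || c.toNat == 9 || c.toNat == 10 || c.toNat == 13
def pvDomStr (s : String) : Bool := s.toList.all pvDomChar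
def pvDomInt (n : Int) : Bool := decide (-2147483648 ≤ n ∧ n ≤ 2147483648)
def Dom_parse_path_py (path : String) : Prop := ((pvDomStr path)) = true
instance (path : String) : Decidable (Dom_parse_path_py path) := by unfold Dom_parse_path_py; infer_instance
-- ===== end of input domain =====

-- B replaces A's retroactive mutation of the last appended dict by a forward-looking
-- index walk that decides each array segment's field by peeking at the next segment (objective: alternative).

-- a part dict {"type": …, "key": …[, "field": …]} as an association list in insertion order
def pvArr (k : String) : List (String × Option String) :=
  [("type", some "array"), ("key", some k), ("field", none)]

def pvObj (k : String) : List (String × Option String) :=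
  [("type", some "object"), ("key", some k)]

-- d[k] on the association list: first match (exact for Python dict lookup on present keys)
def pvGet (d : List (String × Option String)) (k : String) : Option (Option String) :=
  (d.find? (fun p => p.1 == k)).map (·.2)

-- Python's `parts and parts[-1]["type"] == "array" and parts[-1]["field"] is None`
def pvOpen (d : List (String × Option String)) : Bool :=
  pvGet d "type" == some (some "array") && pvGet d "field" == some none

-- d["field"] = seg: overwrite in place (key "field" is present in every array dict)
def pvSetField (d : List (String × Option String)) (seg : String) : List (String × Option String) :=
  d.map (fun p => if p.1 == "field" then (p.1, some seg) else p)

-- ===== PORT A =====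
def pvAStep (parts : List (List (String × Option String))) (seg : String) :
    List (List (String × Option String)) :=
  if PySem.Str.isIn "[]" seg then
    parts ++ [pvArr (PySem.Str.replace seg "[]" "")]
  else
    match parts.getLast? with
    | some d => if pvOpen d then parts.dropLast ++ [pvSetField d seg] else parts ++ [pvObj seg]
    | none => parts ++ [pvObj seg]

def parse_path_py (path : String) : List (List (String × Option String)) :=
  ((PySem.Str.split? path ".").getD []).foldl pvAStep []

-- ===== PORT B =====
def pvArrF (k field : String) : List (String × Option String) :=
  [("type", some "array"), ("key", some k), ("field", some field)]

-- the while-loop of Source B: i advances by 1 or 2 (= recursion dropping one or two segments)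
def pvBGo : List String → List (List (String × Option String))
  | [] => []
  | [s] =>
    if PySem.Str.isIn "[]" s then [pvArr (PySem.Str.replace s "[]" "")] else [pvObj s]
  | s :: t :: ts =>
    if PySem.Str.isIn "[]" s then
      if PySem.Str.isIn "[]" t then
        pvArr (PySem.Str.replace s "[]" "") :: pvBGo (t :: ts)
      else
        pvArrF (PySem.Str.replace s "[]" "") t :: pvBGo ts
    else
      pvObj s :: pvBGo (t :: ts)

def parse_path_py_alt (path : String) : List (List (String × Option String)) :=
  pvBGo ((PySem.Str.split? path ".").getD [])

-- ===== PRECONDITION & SPEC =====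
def Spec_parse_path_py (path : String) (out : List (List (String × Option String))) : Prop := out = parse_path_py_alt path
instance (path : String) (out : List (List (String × Option String))) : Decidable (Spec_parse_path_py path out) := by unfold Spec_parse_path_py; infer_instance

-- ===== CLAIM (what is proved, stated in full; the proofs are below) =====
def Claim_equal_parse_path_py : Prop := ∀ (path : String), Dom_parse_path_py path → Spec_parse_path_py path (parse_path_py path)

-- ===== LEMMAS AND PROOFS =====

def pvFirstBr : List String → Bool
  | [] => false
  | s :: _ => PySem.Str.isIn "[]" s

def pvLastOpen (parts : List (List (String × Option String))) : Bool :=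
  match parts.getLast? with
  | some d => pvOpen d
  | none => false

lemma pvOpen_arr (k : String) : pvOpen (pvArr k) = true := by
  simp [pvOpen, pvGet, pvArr, List.find?]

lemma pvOpen_arrF (k f : String) : pvOpen (pvArrF k f) = false := by
  simp [pvOpen, pvGet, pvArrF, List.find?]

lemma pvOpen_obj (k : String) : pvOpen (pvObj k) = false := by
  simp [pvOpen, pvGet, pvObj, List.find?]

lemma pvSetField_arr (k seg : String) : pvSetField (pvArr k) seg = pvArrF k seg := by
  simp [pvSetField, pvArr, pvArrF]

lemma pvLastOpen_concat (parts : List (List (String × Option String)))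
    (d : List (String × Option String)) : pvLastOpen (parts ++ [d]) = pvOpen d := by
  simp [pvLastOpen]

lemma pvAStep_obj (parts : List (List (String × Option String))) (seg : String)
    (hbr : PySem.Str.isIn "[]" seg = false) (hop : pvLastOpen parts = false) :
    pvAStep parts seg = parts ++ [pvObj seg] := by
  unfold pvAStep
  rw [hbr]
  simp only [Bool.false_eq_true, if_false]
  unfold pvLastOpen at hop
  cases h : parts.getLast? with
  | none => simp
  | some d => rw [h] at hop; simp [hop]

lemma pvMain : ∀ (ss : List String) (parts : List (List (String × Option String))),
    (pvLastOpen parts = true → pvFirstBr ss = true) →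
    ss.foldl pvAStep parts = parts ++ pvBGo ss := by
  intro ss
  induction ss using pvBGo.induct with
  | case1 => intro parts _; simp [pvBGo]
  | case2 s hbr =>
    intro parts _
    have hbrC : PySem.Chars.isIn ['[', ']'] s.toList = true := by simpa using hbr
    simp [List.foldl, pvBGo, pvAStep, hbrC]
  | case3 s hbr =>
    intro parts h
    have hbr' : PySem.Str.isIn "[]" s = false := eq_false_of_ne_true hbr
    have hbrC : PySem.Chars.isIn ['[', ']'] s.toList = false := by simpa using hbr'
    have hop : pvLastOpen parts = false := by
      cases hlo : pvLastOpen parts with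
      | false => rfl
      | true => exact absurd (h hlo) (by simpa [pvFirstBr] using hbr')
    rw [List.foldl_cons, List.foldl_nil, pvAStep_obj parts s hbr' hop]
    simp [pvBGo, hbrC]
  | case4 s t ts hbrS hbrT ih =>
    -- s has "[]", t has "[]": append the open array dict for s, recurse on t :: ts
    intro parts _
    have hbrSC : PySem.Chars.isIn ['[', ']'] s.toList = true := by simpa using hbrS
    have hbrTC : PySem.Chars.isIn ['[', ']'] t.toList = true := by simpa using hbrT
    have hstep : pvAStep parts s = parts ++ [pvArr (PySem.Str.replace s "[]" "")] := by
      unfold pvAStep; rw [hbrS]; simp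
    rw [List.foldl_cons, hstep,
      ih (parts ++ [pvArr (PySem.Str.replace s "[]" "")]) (fun _ => by simpa [pvFirstBr] using hbrT)]
    simp [pvBGo, hbrSC, hbrTC]
  | case5 s t ts hbrS hbrT ih =>
    -- s has "[]", t does not: A mutates the freshly appended array dict; B emits the closed dict directly
    intro parts _
    have hbrT' : PySem.Str.isIn "[]" t = false := eq_false_of_ne_true hbrT
    have hbrSC : PySem.Chars.isIn ['[', ']'] s.toList = true := by simpa using hbrS
    have hbrTC : PySem.Chars.isIn ['[', ']'] t.toList = false := by simpa using hbrT'
    have hstep : pvAStep parts s = parts ++ [pvArr (PySem.Str.replace s "[]" "")] := by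
      unfold pvAStep; rw [hbrS]; simp
    have hstep2 : pvAStep (parts ++ [pvArr (PySem.Str.replace s "[]" "")]) t
        = parts ++ [pvArrF (PySem.Str.replace s "[]" "") t] := by
      unfold pvAStep
      rw [hbrT']
      simp only [List.getLast?_concat]
      rw [pvOpen_arr]
      simp [pvSetField_arr]
    rw [List.foldl_cons, hstep, List.foldl_cons, hstep2,
      ih (parts ++ [pvArrF (PySem.Str.replace s "[]" "") t])
        (by rw [pvLastOpen_concat, pvOpen_arrF]; intro hc; exact absurd hc (by simp))]
    simp [pvBGo, hbrSC, hbrTC]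
  | case6 s t ts hbrS ih =>
    -- s has no "[]": append an object dict (the last part cannot be an open array here)
    intro parts h
    have hbrS' : PySem.Str.isIn "[]" s = false := eq_false_of_ne_true hbrS
    have hbrSC : PySem.Chars.isIn ['[', ']'] s.toList = false := by simpa using hbrS'
    have hop : pvLastOpen parts = false := by
      cases hlo : pvLastOpen parts with
      | false => rfl
      | true => exact absurd (h hlo) (by simpa [pvFirstBr] using hbrS')
    rw [List.foldl_cons, pvAStep_obj parts s hbrS' hop,
      ih (parts ++ [pvObj s]) (by rw [pvLastOpen_concat, pvOpen_obj]; intro hc; exact absurd hc (by simp))]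
    simp [pvBGo, hbrSC]

-- ===== VERDICT (by name: the statement is the Claim_ definition above) =====
theorem parse_path_py_spec : Claim_equal_parse_path_py := by
  intro path _
  unfold Spec_parse_path_py parse_path_py parse_path_py_alt
  exact pvMain _ [] (by simp [pvLastOpen])
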